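-- pv_equiv track=rewrite | github.com/sabrinaabdu1/CMPSC470_Celestia | celestia_tokenizer.py | strip_comments_and_count
-- ===== SOURCE A (Python) =====
-- def strip_comments_and_count(source: str) -> tuple[str, int]:
--     """
--     Remove // line comments and /* */ block comments from source.
--     Returns (cleaned_source, non_comment_line_count).
--     """
--     lines = source.split('\n')
--     cleaned_lines = []
--     in_block_comment = False
--     code_line_count = 0
--
--     for line in lines:
--         result = []
--         i = 0
--         while i < len(line):
--             if in_block_comment:
--                 if line[i] == '*' and i + 1 < len(line) and line[i+1] == '/':
--                     in_block_comment = False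
--                     i += 2
--                 else:
--                     i += 1
--             else:
--                 if line[i] == '/' and i + 1 < len(line) and line[i+1] == '*':
--                     in_block_comment = True
--                     i += 2
--                 elif line[i] == '/' and i + 1 < len(line) and line[i+1] == '/':
--                     break  # rest of line is a comment
--                 else:
--                     result.append(line[i])
--                     i += 1
--
--         cleaned = ''.join(result).strip()
--         cleaned_lines.append(cleaned)
--         if cleaned:
--             code_line_count += 1
--
--     return '\n'.join(cleaned_lines), code_line_count
-- ===== SOURCE B (Python) =====
-- def strip_comments_and_count(source: str) -> tuple[str, int]:
--     """
--     Remove // line comments and /* */ block comments from source.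
--     Returns (cleaned_source, non_comment_line_count).
--     """
--     # One flat scan over the whole string with three states (normal,
--     # line comment, block comment), then a per-line strip/count post-pass.
--     out = []
--     in_line = False
--     in_block = False
--     n = len(source)
--     i = 0
--     while i < n:
--         c = source[i]
--         if c == '\n':
--             out.append('\n')
--             in_line = False
--             i += 1
--         elif in_line:
--             i += 1
--         elif in_block:
--             if c == '*' and i + 1 < n and source[i + 1] == '/':
--                 in_block = False
--                 i += 2
--             else:
--                 i += 1
--         else:
--             if c == '/' and i + 1 < n and source[i + 1] == '*':
--                 in_block = True
--                 i += 2
--             elif c == '/' and i + 1 < n and source[i + 1] == '/':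
--                 in_line = True
--                 i += 2
--             else:
--                 out.append(c)
--                 i += 1
--     stripped = [piece.strip() for piece in ''.join(out).split('\n')]
--     return '\n'.join(stripped), sum(1 for piece in stripped if piece)
-- ===== Notes on version B (the rewrite author's own statement) =====
-- stated objective: alternative
-- what changed: A runs a nested per-line scan (split first, then a while-loop with an index per line, stripping and counting as it goes); B does one flat scan over the whole string with line-comment/block-comment flags building a single buffer, then splits, strips and counts in a post-pass.
import Mathlib
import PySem

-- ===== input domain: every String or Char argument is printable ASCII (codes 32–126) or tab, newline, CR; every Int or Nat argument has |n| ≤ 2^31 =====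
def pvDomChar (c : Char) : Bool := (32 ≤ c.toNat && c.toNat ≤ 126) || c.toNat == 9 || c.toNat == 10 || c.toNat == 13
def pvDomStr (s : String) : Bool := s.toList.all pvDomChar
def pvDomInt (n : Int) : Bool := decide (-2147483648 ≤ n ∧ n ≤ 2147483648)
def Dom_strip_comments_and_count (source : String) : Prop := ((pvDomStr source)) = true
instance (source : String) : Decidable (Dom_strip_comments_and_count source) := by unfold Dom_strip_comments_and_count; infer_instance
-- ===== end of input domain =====

-- B replaces A's per-line nested scan by one flat scan over the whole string with a
-- line-comment flag plus a strip/count post-pass (alternative decomposition, same cost).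

-- ===== PORT A =====
-- inner while loop of A over one line: collects kept chars, returns the block-comment flag
def pvAScan : Bool → List Char → List Char × Bool
  | inB, [] => ([], inB)
  | true, '*' :: '/' :: rest => pvAScan false rest
  | true, _ :: rest => pvAScan true rest
  | false, '/' :: '*' :: rest => pvAScan true rest
  | false, '/' :: '/' :: _ => ([], false)          -- break: rest of line is a comment
  | false, c :: rest => let p := pvAScan false rest; (c :: p.1, p.2)

-- the for-loop over lines: (cleaned lines, code line count)
def pvALoop : Bool → List (List Char) → List (List Char) × Int
  | _, [] => ([], 0)
  | inB, l :: ls =>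
    let p := pvAScan inB l
    let cleaned := PySem.Chars.strip p.1
    let r := pvALoop p.2 ls
    (cleaned :: r.1, (if cleaned.isEmpty then (0 : Int) else 1) + r.2)

def strip_comments_and_count (source : String) : String × Int :=
  let lines := PySem.Chars.splitOn source.toList ['\n']
  let r := pvALoop false lines
  (String.ofList (PySem.Chars.join ['\n'] r.1), r.2)

-- ===== PORT B =====
-- flat scan: states (in_line_comment, in_block_comment); newline emits and clears in_line
def pvBScan : Bool → Bool → List Char → List Char
  | _, _, [] => []
  | _, inB, '\n' :: rest => '\n' :: pvBScan false inB rest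
  | true, inB, _ :: rest => pvBScan true inB rest
  | false, true, '*' :: '/' :: rest => pvBScan false false rest
  | false, true, _ :: rest => pvBScan false true rest
  | false, false, '/' :: '*' :: rest => pvBScan false true rest
  | false, false, '/' :: '/' :: rest => pvBScan true false rest
  | false, false, c :: rest => c :: pvBScan false false rest

def strip_comments_and_count_alt (source : String) : String × Int :=
  let buf := pvBScan false false source.toList
  let stripped := (PySem.Chars.splitOn buf ['\n']).map PySem.Chars.strip
  (String.ofList (PySem.Chars.join ['\n'] stripped),
   ((stripped.filter (fun p => !p.isEmpty)).length : Int))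

-- ===== PRECONDITION & SPEC =====
def Spec_strip_comments_and_count (source : String) (out : String × Int) : Prop := out = strip_comments_and_count_alt source
instance (source : String) (out : String × Int) : Decidable (Spec_strip_comments_and_count source out) := by unfold Spec_strip_comments_and_count; infer_instance

-- ===== CLAIM (what is proved, stated in full; the proofs are below) =====
def Claim_equal_strip_comments_and_count : Prop := ∀ (source : String), Dom_strip_comments_and_count source → Spec_strip_comments_and_count source (strip_comments_and_count source)

-- ===== LEMMAS AND PROOFS =====

-- structural recursion equal to PySem.Chars.splitOn · ['\n']
def pvLines : List Char → List (List Char)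
  | [] => [[]]
  | c :: cs => if c = '\n' then [] :: pvLines cs else (pvLines cs).modifyHead (c :: ·)

-- per-line outputs of A's scan, threading the block flag
def pvLinesOut : Bool → List (List Char) → List (List Char)
  | _, [] => []
  | inB, l :: ls => (pvAScan inB l).1 :: pvLinesOut (pvAScan inB l).2 ls

theorem pvLines_ne_nil (cs : List Char) : pvLines cs ≠ [] := by
  cases cs with
  | nil => simp [pvLines]
  | cons c cs =>
    simp only [pvLines]
    split
    · simp
    · cases h : pvLines cs with
      | nil => exact absurd h (pvLines_ne_nil cs)
      | cons a t => simp [List.modifyHead]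

theorem pv_go_eq (fuel : Nat) : ∀ (l cur : List Char) (acc : List (List Char)),
    l.length < fuel →
    PySem.Chars.splitOn.go ['\n'] fuel l cur acc
      = acc.reverse ++ (pvLines l).modifyHead (fun x => cur.reverse ++ x) := by
  induction fuel with
  | zero => intro l cur acc h; omega
  | succ n ih =>
    intro l cur acc h
    cases l with
    | nil => simp [PySem.Chars.splitOn.go, pvLines, List.modifyHead]
    | cons c rest =>
      by_cases hc : c = '\n'
      · subst hc
        rw [show PySem.Chars.splitOn.go ['\n'] (n+1) ('\n' :: rest) cur acc
              = PySem.Chars.splitOn.go ['\n'] n rest [] (cur.reverse :: acc) from by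
            simp [PySem.Chars.splitOn.go, List.isPrefixOf]]
        rw [ih rest [] (cur.reverse :: acc) (by simpa using h)]
        simp only [pvLines, List.modifyHead, List.reverse_cons, List.append_assoc]
        cases pvLines rest <;> simp
      · rw [show PySem.Chars.splitOn.go ['\n'] (n+1) (c :: rest) cur acc
              = PySem.Chars.splitOn.go ['\n'] n rest (c :: cur) acc from by
            simp only [PySem.Chars.splitOn.go, List.isPrefixOf, Bool.and_true, beq_iff_eq]
            rw [if_neg (fun heq => absurd heq.symm hc)]]
        rw [ih rest (c :: cur) acc (by simpa using h)]
        simp only [pvLines, if_neg hc]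
        cases hp : pvLines rest with
        | nil => exact absurd hp (pvLines_ne_nil rest)
        | cons a t => simp [List.modifyHead]

theorem pv_splitOn_eq (cs : List Char) : PySem.Chars.splitOn cs ['\n'] = pvLines cs := by
  rw [show PySem.Chars.splitOn cs ['\n'] = PySem.Chars.splitOn.go ['\n'] (cs.length + 1) cs [] [] from rfl]
  rw [pv_go_eq (cs.length + 1) cs [] [] (by omega)]
  cases h : pvLines cs with
  | nil => exact absurd h (pvLines_ne_nil cs)
  | cons a t => simp [List.modifyHead]

theorem pv_no_nl_pvLines (cs : List Char) : ∀ l ∈ pvLines cs, '\n' ∉ l := by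
  induction cs with
  | nil => simp [pvLines]
  | cons c cs ih =>
    intro l hl
    simp only [pvLines] at hl
    split at hl
    · rcases List.mem_cons.mp hl with h | h
      · simp [h]
      · exact ih l h
    · cases hp : pvLines cs with
      | nil => exact absurd hp (pvLines_ne_nil cs)
      | cons a t =>
        rw [hp] at hl
        simp only [List.modifyHead] at hl
        rcases List.mem_cons.mp hl with h | h
        · subst h
          intro hmem
          rcases List.mem_cons.mp hmem with h' | h'
          · exact ‹¬ c = '\n'› h'.symm
          · exact ih a (hp ▸ List.mem_cons_self) h'
        · exact ih l (hp ▸ List.mem_cons_of_mem a h)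

theorem pvAScan_subset (inB : Bool) (l : List Char) : (pvAScan inB l).1 ⊆ l := by
  fun_induction pvAScan inB l <;>
    simp_all [List.subset_def]
  tauto

theorem pv_no_nl_linesOut (inB : Bool) (ls : List (List Char))
    (h : ∀ l ∈ ls, '\n' ∉ l) : ∀ m ∈ pvLinesOut inB ls, '\n' ∉ m := by
  induction ls generalizing inB with
  | nil => simp [pvLinesOut]
  | cons l ls ih =>
    intro m hm
    simp only [pvLinesOut] at hm
    rcases List.mem_cons.mp hm with h' | h'
    · subst h'
      intro hmem
      exact h l List.mem_cons_self (pvAScan_subset inB l hmem)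
    · exact ih _ (fun x hx => h x (List.mem_cons_of_mem l hx)) m h'

theorem pvLinesOut_ne_nil (inB : Bool) (ls : List (List Char)) (h : ls ≠ []) :
    pvLinesOut inB ls ≠ [] := by
  cases ls with
  | nil => exact absurd rfl h
  | cons l ls => simp [pvLinesOut]

theorem pvLines_no_nl (l : List Char) (h : '\n' ∉ l) : pvLines l = [l] := by
  induction l with
  | nil => rfl
  | cons c cs ih =>
    have hc : ¬ c = '\n' := fun hc => h (hc ▸ List.mem_cons_self)
    simp only [pvLines, if_neg hc, ih (fun hm => h (List.mem_cons_of_mem c hm))]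
    rfl

theorem pvLines_append (l cs : List Char) (h : '\n' ∉ l) :
    pvLines (l ++ '\n' :: cs) = l :: pvLines cs := by
  induction l with
  | nil => simp [pvLines]
  | cons c l ih =>
    have hc : ¬ c = '\n' := fun hc => h (hc ▸ List.mem_cons_self)
    simp only [List.cons_append, pvLines, if_neg hc,
      ih (fun hm => h (List.mem_cons_of_mem c hm))]
    rfl

theorem pvLines_join (ls : List (List Char)) (hne : ls ≠ [])
    (h : ∀ l ∈ ls, '\n' ∉ l) : pvLines (PySem.Chars.join ['\n'] ls) = ls := by
  induction ls with
  | nil => exact absurd rfl hne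
  | cons l ls ih =>
    cases ls with
    | nil =>
      rw [PySem.Chars.join_singleton]
      exact pvLines_no_nl l (h l List.mem_cons_self)
    | cons l' t =>
      rw [PySem.Chars.join_cons_cons]
      rw [List.append_assoc,
        show ['\n'] ++ PySem.Chars.join ['\n'] (l' :: t) = '\n' :: PySem.Chars.join ['\n'] (l' :: t) from rfl,
        pvLines_append l _ (h l List.mem_cons_self),
        ih (by simp) (fun x hx => h x (List.mem_cons_of_mem l hx))]

theorem pv_join_nil_cons (X : List (List Char)) (h : X ≠ []) :
    PySem.Chars.join ['\n'] ([] :: X) = '\n' :: PySem.Chars.join ['\n'] X := by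
  cases X with
  | nil => exact absurd rfl h
  | cons x xs => rw [PySem.Chars.join_cons_cons]; rfl

theorem pv_join_head_cons (c : Char) (x : List Char) (xs : List (List Char)) :
    PySem.Chars.join ['\n'] ((c :: x) :: xs) = c :: PySem.Chars.join ['\n'] (x :: xs) := by
  cases xs with
  | nil => rw [PySem.Chars.join_singleton, PySem.Chars.join_singleton]
  | cons y ys => rw [PySem.Chars.join_cons_cons, PySem.Chars.join_cons_cons]; rfl

theorem pvLines_cons_head (c : Char) (r : List Char) (hc : ¬ c = '\n') :
    ∃ h t, pvLines r = h :: t ∧ pvLines (c :: r) = (c :: h) :: t := by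
  cases hp : pvLines r with
  | nil => exact absurd hp (pvLines_ne_nil r)
  | cons h t =>
    refine ⟨h, t, rfl, ?_⟩
    rw [pvLines, if_neg hc, hp]
    rfl

theorem pvALoop_eq (inB : Bool) (ls : List (List Char)) :
    pvALoop inB ls =
      ((pvLinesOut inB ls).map PySem.Chars.strip,
       ((((pvLinesOut inB ls).map PySem.Chars.strip).filter (fun p => !p.isEmpty)).length : Int)) := by
  induction ls generalizing inB with
  | nil => simp [pvALoop, pvLinesOut]
  | cons l ls ih =>
    simp only [pvALoop, pvLinesOut, List.map_cons, List.filter_cons, ih]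
    by_cases he : (PySem.Chars.strip (pvAScan inB l).1).isEmpty
    · simp [he]
    · simp [he]; omega

theorem pvBScan_eq_aux : ∀ (n : Nat) (cs : List Char), cs.length ≤ n → ∀ (inL inB : Bool),
    pvBScan inL inB cs =
      if inL then PySem.Chars.join ['\n'] ([] :: pvLinesOut inB (pvLines cs).tail)
      else PySem.Chars.join ['\n'] (pvLinesOut inB (pvLines cs)) := by
  intro n
  induction n with
  | zero =>
    intro cs hlen inL inB
    have : cs = [] := List.length_eq_zero_iff.mp (Nat.le_zero.mp hlen)
    subst this
    cases inL <;>
      simp [pvBScan, pvLines, pvLinesOut, pvAScan, PySem.Chars.join_singleton]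
  | succ n ih =>
    intro cs hlen inL inB
    cases cs with
    | nil =>
      cases inL <;>
        simp [pvBScan, pvLines, pvLinesOut, pvAScan, PySem.Chars.join_singleton]
    | cons c rest =>
      by_cases hc : c = '\n'
      · subst hc
        have hstep : ∀ (L B : Bool), pvBScan L B ('\n' :: rest) = '\n' :: pvBScan false B rest := by
          intro L B; cases L <;> simp [pvBScan]
        have hXne : pvLinesOut inB (pvLines rest) ≠ [] :=
          pvLinesOut_ne_nil _ _ (pvLines_ne_nil rest)
        have hpv : pvLines ('\n' :: rest) = [] :: pvLines rest := by simp [pvLines]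
        have hout : pvLinesOut inB ([] :: pvLines rest) = [] :: pvLinesOut inB (pvLines rest) := by
          simp [pvLinesOut, pvAScan]
        rw [hstep, ih rest (by simpa using hlen) false inB, if_neg (by simp), hpv]
        cases inL
        · rw [if_neg (by simp), hout, pv_join_nil_cons _ hXne]
        · rw [if_pos rfl, List.tail_cons, pv_join_nil_cons _ hXne]
      · cases inL with
        | true =>
          have hstep : pvBScan true inB (c :: rest) = pvBScan true inB rest := by
            simp [pvBScan]
          obtain ⟨h, t, hpr, hpc⟩ := pvLines_cons_head c rest hc
          rw [hstep, ih rest (by simpa using hlen) true inB, if_pos rfl, if_pos rfl,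
            hpc, hpr, List.tail_cons, List.tail_cons]
        | false =>
          rw [if_neg (by simp)]
          cases inB with
          | true =>
            cases rest with
            | nil =>
              have h1 : pvBScan false true [c] = [] := by simp [pvBScan]
              have h2 : pvLines [c] = [[c]] := by simp [pvLines, hc, List.modifyHead]
              have h3 : pvAScan true [c] = ([], true) := by simp [pvAScan]
              rw [h1, h2]
              simp [pvLinesOut, h3, PySem.Chars.join_singleton]
            | cons c2 cs2 =>
              obtain ⟨h, t, hpr, hpc⟩ := pvLines_cons_head c (c2 :: cs2) hc
              by_cases hbe : c = '*' ∧ c2 = '/'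
              · obtain ⟨hb1, hb2⟩ := hbe; subst hb1; subst hb2
                have hstep : pvBScan false true ('*' :: '/' :: cs2) = pvBScan false false cs2 := by
                  simp [pvBScan]
                obtain ⟨h0, t0, hpr0, hpc0⟩ := pvLines_cons_head '/' cs2 (by decide)
                have hpc2 : pvLines ('*' :: '/' :: cs2) = ('*' :: '/' :: h0) :: t0 := by
                  simp [pvLines, hpr0, List.modifyHead]
                have hscan : pvAScan true ('*' :: '/' :: h0) = pvAScan false h0 := by
                  simp [pvAScan]
                rw [hstep, ih cs2 (by simp at hlen; omega) false false, if_neg (by simp),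
                  hpc2, hpr0]
                simp [pvLinesOut, hscan]
              · have hstep : pvBScan false true (c :: c2 :: cs2) = pvBScan false true (c2 :: cs2) := by
                  rw [pvBScan.eq_def]; split <;> simp_all
                have hscan : pvAScan true (c :: h) = pvAScan true h := by
                  by_cases hc2 : c2 = '\n'
                  · subst hc2
                    have hnil : h = [] := by
                      have hx : pvLines ('\n' :: cs2) = [] :: pvLines cs2 := by simp [pvLines]
                      have h2 := hx.symm.trans hpr
                      injection h2 with h3 _
                      exact h3.symm
                    subst hnil
                    rw [pvAScan.eq_def]; split <;> simp_all
                  · obtain ⟨hh, tt, hpr2, hpc2⟩ := pvLines_cons_head c2 cs2 hc2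
                    have h2 := hpc2.symm.trans hpr
                    injection h2 with h3 _
                    have hhd : h = c2 :: hh := h3.symm
                    subst hhd
                    rw [pvAScan.eq_def]; split <;> simp_all
                rw [hstep, ih (c2 :: cs2) (by simp at hlen ⊢; omega) false true, if_neg (by simp),
                  hpc, hpr]
                simp [pvLinesOut, hscan]
          | false =>
            cases rest with
            | nil =>
              have h1 : pvBScan false false [c] = [c] := by simp [pvBScan]
              have h2 : pvLines [c] = [[c]] := by simp [pvLines, hc, List.modifyHead]
              have h3 : pvAScan false [c] = ([c], false) := by simp [pvAScan]
              rw [h1, h2]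
              simp [pvLinesOut, h3, PySem.Chars.join_singleton]
            | cons c2 cs2 =>
              obtain ⟨h, t, hpr, hpc⟩ := pvLines_cons_head c (c2 :: cs2) hc
              by_cases hb : c = '/' ∧ c2 = '*'
              · obtain ⟨hb1, hb2⟩ := hb; subst hb1; subst hb2
                have hstep : pvBScan false false ('/' :: '*' :: cs2) = pvBScan false true cs2 := by
                  simp [pvBScan]
                obtain ⟨h0, t0, hpr0, hpc0⟩ := pvLines_cons_head '*' cs2 (by decide)
                have hpc2 : pvLines ('/' :: '*' :: cs2) = ('/' :: '*' :: h0) :: t0 := by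
                  simp [pvLines, hpr0, List.modifyHead]
                have hscan : pvAScan false ('/' :: '*' :: h0) = pvAScan true h0 := by
                  simp [pvAScan]
                rw [hstep, ih cs2 (by simp at hlen; omega) false true, if_neg (by simp),
                  hpc2, hpr0]
                simp [pvLinesOut, hscan]
              · by_cases hb' : c = '/' ∧ c2 = '/'
                · obtain ⟨hb1, hb2⟩ := hb'; subst hb1; subst hb2
                  have hstep : pvBScan false false ('/' :: '/' :: cs2) = pvBScan true false cs2 := by
                    simp [pvBScan]
                  obtain ⟨h0, t0, hpr0, hpc0⟩ := pvLines_cons_head '/' cs2 (by decide)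
                  have hpc2 : pvLines ('/' :: '/' :: cs2) = ('/' :: '/' :: h0) :: t0 := by
                    simp [pvLines, hpr0, List.modifyHead]
                  have hscan : pvAScan false ('/' :: '/' :: h0) = ([], false) := by
                    simp [pvAScan]
                  rw [hstep, ih cs2 (by simp at hlen; omega) true false, if_pos rfl,
                    hpc2, hpr0, List.tail_cons]
                  simp [pvLinesOut, hscan]
                · have hstep : pvBScan false false (c :: c2 :: cs2) = c :: pvBScan false false (c2 :: cs2) := by
                    rw [pvBScan.eq_def]; split <;> simp_all
                  have hscan : pvAScan false (c :: h) = (c :: (pvAScan false h).1, (pvAScan false h).2) := by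
                    by_cases hc2 : c2 = '\n'
                    · subst hc2
                      have hnil : h = [] := by
                        have hx : pvLines ('\n' :: cs2) = [] :: pvLines cs2 := by simp [pvLines]
                        have h2 := hx.symm.trans hpr
                        injection h2 with h3 _
                        exact h3.symm
                      subst hnil
                      rw [pvAScan.eq_def]; split <;> simp_all
                    · obtain ⟨hh, tt, hpr2, hpc2⟩ := pvLines_cons_head c2 cs2 hc2
                      have h2 := hpc2.symm.trans hpr
                      injection h2 with h3 _
                      have hhd : h = c2 :: hh := h3.symm
                      subst hhd
                      rw [pvAScan.eq_def]; split <;> simp_all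
                  rw [hstep, ih (c2 :: cs2) (by simp at hlen ⊢; omega) false false, if_neg (by simp),
                    hpc, hpr]
                  simp only [pvLinesOut, hscan]
                  rw [pv_join_head_cons]

theorem pvBScan_eq (inL inB : Bool) (cs : List Char) :
    pvBScan inL inB cs =
      if inL then PySem.Chars.join ['\n'] ([] :: pvLinesOut inB (pvLines cs).tail)
      else PySem.Chars.join ['\n'] (pvLinesOut inB (pvLines cs)) :=
  pvBScan_eq_aux cs.length cs le_rfl inL inB


-- ===== VERDICT (by name: the statement is the Claim_ definition above) =====
theorem strip_comments_and_count_spec : Claim_equal_strip_comments_and_count := by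
  unfold Claim_equal_strip_comments_and_count Spec_strip_comments_and_count
  intro source _
  show strip_comments_and_count source = strip_comments_and_count_alt source
  unfold strip_comments_and_count strip_comments_and_count_alt
  simp only [pv_splitOn_eq, pvALoop_eq, pvBScan_eq, Bool.false_eq_true, if_false]
  rw [pvLines_join (pvLinesOut false (pvLines source.toList))
    (pvLinesOut_ne_nil _ _ (pvLines_ne_nil _))
    (pv_no_nl_linesOut _ _ (pv_no_nl_pvLines _))]
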